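-- pv_equiv track=rewrite | github.com/SebZanardo/Advent-of-Code-2025 | solutions/11-Reactor/main.py | DFS
-- ===== SOURCE A (Python) =====
-- def DFS(current, target, server, memo) -> int:
--     if current == target:
--         return 1
--
--     # Handle case if target is 'out' or similar
--     if current not in server:
--         return 0
--
--     if current not in memo:
--         total = 0
--         for path in server[current]:
--             total += DFS(path, target, server, memo)
--         memo[current] = total
--
--     return memo[current]
-- ===== SOURCE B (Python) =====
-- def DFS(current, target, server, memo):
--     # Iterative re-implementation: explicit worklist/stack instead of recursion.
--     # Mutates `memo` exactly like the original (same entries, same insertion order).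
--     def resolved(n):
--         # a node's count if already available: target -> 1, off-graph -> 0,
--         # memoized -> its memo entry; None while still unresolved
--         if n == target:
--             return 1
--         if n not in server:
--             return 0
--         return memo.get(n)
--
--     top = resolved(current)
--     if top is not None:
--         return top
--     stack = [current]
--     while stack:
--         node = stack[-1]
--         total = 0
--         pending = None
--         for child in server[node]:
--             v = resolved(child)
--             if v is None:
--                 pending = child
--                 break
--             total += v
--         if pending is None:
--             memo[node] = total
--             stack.pop()
--         else:
--             stack.append(pending)
--     return memo[current]
-- ===== Notes on version B (the rewrite author's own statement) =====
-- stated objective: alternative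
-- what changed: The memoized recursion is replaced by an iterative worklist: an explicit stack of unresolved nodes whose top is repeatedly re-scanned (target child counts 1, off-graph child 0, memoized child its entry) until all its children resolve, then memoized and popped; no call stack and no per-frame partial sums are kept.
import Mathlib
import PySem

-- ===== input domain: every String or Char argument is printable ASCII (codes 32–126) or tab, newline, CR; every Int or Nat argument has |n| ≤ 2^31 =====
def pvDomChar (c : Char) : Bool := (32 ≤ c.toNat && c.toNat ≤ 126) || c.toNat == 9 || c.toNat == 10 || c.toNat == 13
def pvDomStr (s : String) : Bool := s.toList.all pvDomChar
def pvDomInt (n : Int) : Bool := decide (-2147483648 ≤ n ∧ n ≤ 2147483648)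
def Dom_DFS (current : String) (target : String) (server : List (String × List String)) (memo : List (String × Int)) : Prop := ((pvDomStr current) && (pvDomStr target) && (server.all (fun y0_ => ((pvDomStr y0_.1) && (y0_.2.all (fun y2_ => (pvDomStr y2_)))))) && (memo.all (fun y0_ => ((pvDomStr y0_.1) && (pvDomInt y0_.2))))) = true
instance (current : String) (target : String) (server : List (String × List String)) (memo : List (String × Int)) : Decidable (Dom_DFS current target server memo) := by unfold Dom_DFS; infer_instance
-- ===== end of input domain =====

-- B replaces A's recursion by an explicit worklist/stack machine (same memo mutation; the
-- equivalence proved here is about the RETURN value; both also write the same memo entries).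

-- ===== PORT A =====
-- Python A is an unbounded recursion; the port totalizes it with a fuel guard: `none` models
-- the recursion not returning (RecursionError on a reachable cycle, excluded by Pre_DFS below).
def DFS_goA (target : String) (server : List (String × List String)) :
    Nat → String → PySem.Dict String Int → Option (Int × PySem.Dict String Int)
  | 0, _, _ => none
  | f+1, current, memo =>
    if current = target then some (1, memo)
    else
      match (PySem.Dict.mk server).get? current with
      | none => some (0, memo)                      -- current not in server
      | some paths =>
        match memo.get? current with
        | some v => some (v, memo)                  -- current in memo: return memo[current]
        | none =>
          -- total = 0; for path in server[current]: total += DFS(path, ...)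
          match paths.foldl
              (fun acc path =>
                match acc with
                | none => none
                | some (total, m) =>
                  match DFS_goA target server f path m with
                  | none => none
                  | some (v, m') => some (total + v, m'))
              (some ((0 : Int), memo)) with
          | none => none
          | some (total, m1) =>
            let m2 := m1.insert current total       -- memo[current] = total
            match m2.get? current with              -- return memo[current]
            | some v => some (v, m2)
            | none => none                          -- unreachable: the key was just inserted

def DFS (current : String) (target : String) (server : List (String × List String)) (memo : List (String × Int)) : Int :=
  match DFS_goA target server (server.length + 1) current (PySem.Dict.mk memo) with
  | some (v, _) => v
  | none => 0                                       -- fuel exhausted: A raises instead (outside Pre_DFS)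

-- ===== PORT B =====
-- `resolved(n)` of Source B: a node's count if already available, none while unresolved
def DFS_val? (target : String) (server : List (String × List String))
    (memo : PySem.Dict String Int) (n : String) : Option Int :=
  if n = target then some 1
  else
    match (PySem.Dict.mk server).get? n with
    | none => some 0
    | some _ => memo.get? n

-- the `for child in server[node]` scan with early break: (pending child, partial total)
def DFS_scan (target : String) (server : List (String × List String))
    (memo : PySem.Dict String Int) : List String → Int → Option String × Int
  | [], total => (none, total)
  | c :: cs, total =>
    match DFS_val? target server memo c with
    | some v => DFS_scan target server memo cs (total + v)
    | none => (some c, total)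

-- the while-loop over the explicit stack, totalized with a fuel guard (`none` = loop does
-- not terminate; unreachable under Pre_DFS)
def DFS_run (target : String) (server : List (String × List String)) :
    Nat → List String → PySem.Dict String Int → Option (PySem.Dict String Int)
  | 0, _, _ => none
  | _+1, [], memo => some memo
  | f+1, node :: rest, memo =>
    match DFS_scan target server memo (((PySem.Dict.mk server).get? node).getD []) 0 with
    | (none, total) => DFS_run target server f rest (memo.insert node total)   -- memo[node] = total; pop
    | (some c, _) => DFS_run target server f (c :: node :: rest) memo          -- push pending child

def DFS_alt (current : String) (target : String) (server : List (String × List String)) (memo : List (String × Int)) : Int :=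
  match DFS_val? target server (PySem.Dict.mk memo) current with
  | some v => v
  | none =>
    match DFS_run target server (2 * server.length + 2) [current] (PySem.Dict.mk memo) with
    | some m => m.getD current 0                    -- return memo[current]
    | none => 0                                     -- fuel exhausted: B loops forever instead (outside Pre_DFS)

-- ===== PRECONDITION & SPEC =====
def pvChildren (server : List (String × List String)) (n : String) : List String :=
  ((PySem.Dict.mk server).get? n).getD []

-- a node the recursion actually enters: not the target, a server key, not initially memoized
def pvActive (target : String) (server : List (String × List String)) (memo : List (String × Int)) (n : String) : Bool :=
  (!(n == target)) && ((PySem.Dict.mk server).get? n).isSome && ((PySem.Dict.mk memo).get? n).isNone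

def pvChildrenA (target : String) (server : List (String × List String)) (memo : List (String × Int)) (n : String) : List String :=
  (pvChildren server n).filter (pvActive target server memo)

def pvGrowA (target : String) (server : List (String × List String)) (memo : List (String × Int)) (S : List String) : List String :=
  PySem.List.dedup (S ++ S.flatMap (pvChildrenA target server memo))

def pvSatA (target : String) (server : List (String × List String)) (memo : List (String × Int)) : Nat → List String → List String
  | 0, S => S
  | n+1, S => pvSatA target server memo n (pvGrowA target server memo S)

-- On exactly the inputs where a cycle of active nodes (non-target server keys not in the
-- initial memo) is reachable from `current` through active nodes, Python A's recursion never
-- returns (RecursionError) and Python B's while-loop never terminates; Pre_DFS excludes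
-- exactly those inputs and nothing else.
def Pre_DFS (current : String) (target : String) (server : List (String × List String)) (memo : List (String × Int)) : Prop :=
  ∀ n ∈ pvSatA target server memo server.length
      (if pvActive target server memo current = true then [current] else []),
    n ∉ pvSatA target server memo server.length (pvChildrenA target server memo n)

instance (current : String) (target : String) (server : List (String × List String)) (memo : List (String × Int)) : Decidable (Pre_DFS current target server memo) := by
  unfold Pre_DFS; infer_instance

def pvWitness_DFS : String × String × (List (String × List String)) × (List (String × Int)) :=
  ("a", "t", [("a", ["b", "t"]), ("b", ["x", "c"])], [("c", 3)])

def Spec_DFS (current : String) (target : String) (server : List (String × List String)) (memo : List (String × Int)) (out : Int) : Prop := out = DFS_alt current target server memo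
instance (current : String) (target : String) (server : List (String × List String)) (memo : List (String × Int)) (out : Int) : Decidable (Spec_DFS current target server memo out) := by unfold Spec_DFS; infer_instance

-- ===== CLAIM (what is proved, stated in full; the proofs are below) =====
def Claim_equal_DFS : Prop := ∀ (current : String) (target : String) (server : List (String × List String)) (memo : List (String × Int)), Dom_DFS current target server memo → Pre_DFS current target server memo → Spec_DFS current target server memo (DFS current target server memo)

-- ===== LEMMAS AND PROOFS =====

-- chains of active ancestors rooted at `root`: pvChainF … root [a_k, …, a_1] n means
-- a_1 = is reached from root and root/a_1 → a_2 → … → a_k → n are edges of the server graph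
-- (first-match lookup) with every a_i active; the chain bottoms out at root itself
inductive pvChainF (tgt : String) (srv : List (String × List String)) (memo0 : List (String × Int)) (root : String) : List String → String → Prop
  | nil : pvChainF tgt srv memo0 root [] root
  | cons {a n : String} {cs : List String} {p : List String} :
      (PySem.Dict.mk srv).get? a = some cs → n ∈ cs →
      pvActive tgt srv memo0 a = true →
      pvChainF tgt srv memo0 root p a → pvChainF tgt srv memo0 root (a :: p) n

-- dictionary lookup on a literal assoc list: basic facts
theorem pv_get?_mk_append {ν : Type} (l1 l2 : List (String × ν)) (k : String) :
    (PySem.Dict.mk (l1 ++ l2)).get? k = ((PySem.Dict.mk l1).get? k).or ((PySem.Dict.mk l2).get? k) := by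
  induction l1 with
  | nil => simp [PySem.Dict.get?]
  | cons h tl ih =>
    obtain ⟨a, b⟩ := h
    simp only [List.cons_append, PySem.Dict.get?_mk_cons]
    split <;> simp_all

theorem pv_get?_mk_some_mem {ν : Type} (s : List (String × ν)) (k : String) (cs : ν)
    (h : (PySem.Dict.mk s).get? k = some cs) : (k, cs) ∈ s := by
  induction s with
  | nil => simp [PySem.Dict.get?] at h
  | cons p tl ih =>
    obtain ⟨a, b⟩ := p
    rw [PySem.Dict.get?_mk_cons] at h
    by_cases hak : a = k
    · subst hak; simp at h; simp [h]
    · simp [hak] at h; exact List.mem_cons_of_mem _ (ih h)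

theorem pv_get?_mk_none_not_mem {ν : Type} (l : List (String × ν)) (k : String)
    (h : (PySem.Dict.mk l).get? k = none) : k ∉ l.map Prod.fst := by
  induction l with
  | nil => simp
  | cons p tl ih =>
    obtain ⟨a, b⟩ := p
    rw [PySem.Dict.get?_mk_cons] at h
    by_cases hak : a = k
    · subst hak; simp at h
    · simp [hak] at h
      simp [ih h]
      exact fun hk => hak hk.symm

-- saturation lemmas for pvSatA
theorem pvGrowA_mono (tgt : String) (srv : List (String × List String)) (memo0 : List (String × Int)) (S T : List String) (h : S ⊆ T) :
    pvGrowA tgt srv memo0 S ⊆ pvGrowA tgt srv memo0 T := by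
  intro x hx
  simp only [pvGrowA, PySem.List.mem_dedup, List.mem_append, List.mem_flatMap] at hx ⊢
  rcases hx with hx | ⟨c, hc, hx⟩
  · exact Or.inl (h hx)
  · exact Or.inr ⟨c, h hc, hx⟩

theorem pvGrowA_sub (tgt : String) (srv : List (String × List String)) (memo0 : List (String × Int)) (S : List String) : S ⊆ pvGrowA tgt srv memo0 S := by
  intro x hx; simp [pvGrowA, hx]

theorem pvSatA_mono_set (tgt : String) (srv : List (String × List String)) (memo0 : List (String × Int)) :
    ∀ (n : Nat) (S T : List String), S ⊆ T → pvSatA tgt srv memo0 n S ⊆ pvSatA tgt srv memo0 n T := by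
  intro n
  induction n with
  | zero => intro S T h; exact h
  | succ n ih => intro S T h; exact ih _ _ (pvGrowA_mono tgt srv memo0 _ _ h)

theorem pvSatA_le (tgt : String) (srv : List (String × List String)) (memo0 : List (String × Int)) :
    ∀ {a b : Nat}, a ≤ b → ∀ (S : List String), pvSatA tgt srv memo0 a S ⊆ pvSatA tgt srv memo0 b S := by
  intro a b
  induction b generalizing a with
  | zero => intro h S; interval_cases a; exact fun x hx => hx
  | succ b ih =>
    intro h S
    rcases Nat.eq_or_lt_of_le h with rfl | hlt
    · exact fun x hx => hx
    · intro x hx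
      have h1 : x ∈ pvSatA tgt srv memo0 b S := ih (by omega) S hx
      exact pvSatA_mono_set tgt srv memo0 b _ _ (pvGrowA_sub tgt srv memo0 S) h1

theorem pvSatA_step (tgt : String) (srv : List (String × List String)) (memo0 : List (String × Int)) :
    ∀ (n : Nat) (S : List String) (x y : String),
      x ∈ pvSatA tgt srv memo0 n S → y ∈ pvChildrenA tgt srv memo0 x → y ∈ pvSatA tgt srv memo0 (n+1) S := by
  intro n
  induction n with
  | zero =>
    intro S x y hx hy
    show y ∈ pvGrowA tgt srv memo0 S
    simp only [pvGrowA, PySem.List.mem_dedup, List.mem_append, List.mem_flatMap]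
    exact Or.inr ⟨x, hx, hy⟩
  | succ n ih =>
    intro S x y hx hy
    exact ih (pvGrowA tgt srv memo0 S) x y hx hy

-- chain lemmas
theorem pvChainF_active {tgt : String} {srv : List (String × List String)} {memo0 : List (String × Int)} {root : String}
    {p : List String} {n : String} (h : pvChainF tgt srv memo0 root p n) :
    ∀ a ∈ p, pvActive tgt srv memo0 a = true := by
  induction h with
  | nil => simp
  | cons hget hmem hact hp ih =>
    intro a ha
    rcases List.mem_cons.mp ha with rfl | ha
    · exact hact
    · exact ih a ha

theorem pvChainF_keys {tgt : String} {srv : List (String × List String)} {memo0 : List (String × Int)} {root : String}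
    {p : List String} {n : String} (h : pvChainF tgt srv memo0 root p n) :
    ∀ a ∈ p, ∃ cs, (PySem.Dict.mk srv).get? a = some cs := by
  induction h with
  | nil => simp
  | cons hget hmem hact hp ih =>
    intro a ha
    rcases List.mem_cons.mp ha with rfl | ha
    · exact ⟨_, hget⟩
    · exact ih a ha

-- the chain's child n is an active child of its parent
theorem pvChainF_child_mem {tgt : String} {srv : List (String × List String)} {memo0 : List (String × Int)}
    {a n : String} {cs : List String}
    (hget : (PySem.Dict.mk srv).get? a = some cs) (hmem : n ∈ cs)
    (hactn : pvActive tgt srv memo0 n = true) : n ∈ pvChildrenA tgt srv memo0 a := by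
  simp only [pvChildrenA, pvChildren, hget, Option.getD_some, List.mem_filter]
  exact ⟨hmem, hactn⟩

theorem pvChainF_sat {tgt : String} {srv : List (String × List String)} {memo0 : List (String × Int)} {root : String}
    {p : List String} {n : String} (h : pvChainF tgt srv memo0 root p n)
    (hactn : pvActive tgt srv memo0 n = true) :
    ∀ a ∈ p, n ∈ pvSatA tgt srv memo0 p.length (pvChildrenA tgt srv memo0 a) := by
  induction h with
  | nil => simp
  | cons hget hmem hact hp ih =>
    rename_i b nn cs q
    intro a ha
    rcases List.mem_cons.mp ha with rfl | ha
    · exact pvSatA_le tgt srv memo0 (Nat.zero_le _) _ (pvChainF_child_mem hget hmem hactn)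
    · have hb : b ∈ pvSatA tgt srv memo0 q.length (pvChildrenA tgt srv memo0 a) := ih hact a ha
      have := pvSatA_step tgt srv memo0 q.length _ b nn hb (pvChainF_child_mem hget hmem hactn)
      simpa using this

-- the chain's endpoint is reachable from the root
theorem pvChainF_end {tgt : String} {srv : List (String × List String)} {memo0 : List (String × Int)} {root : String}
    {p : List String} {n : String} (h : pvChainF tgt srv memo0 root p n)
    (hactn : pvActive tgt srv memo0 n = true) :
    n ∈ pvSatA tgt srv memo0 p.length [root] := by
  induction h with
  | nil => simp [pvSatA]
  | cons hget hmem hact hp ih =>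
    rename_i b nn cs q
    have hb : b ∈ pvSatA tgt srv memo0 q.length [root] := ih hact
    have := pvSatA_step tgt srv memo0 q.length _ b nn hb (pvChainF_child_mem hget hmem hactn)
    simpa using this

theorem pvChainF_mem_reach {tgt : String} {srv : List (String × List String)} {memo0 : List (String × Int)} {root : String}
    {p : List String} {n : String} (h : pvChainF tgt srv memo0 root p n) :
    ∀ a ∈ p, a ∈ pvSatA tgt srv memo0 p.length [root] := by
  induction h with
  | nil => simp
  | cons hget hmem hact hp ih =>
    rename_i b nn cs q
    intro a ha
    rcases List.mem_cons.mp ha with rfl | ha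
    · have := pvChainF_end hp hact
      exact pvSatA_le tgt srv memo0 (by simp) _ this
    · exact pvSatA_le tgt srv memo0 (by simp) _ (ih a ha)

theorem pv_nodup_len (p Q : List String) (hnd : p.Nodup) (hsub : ∀ a ∈ p, a ∈ Q) :
    p.length ≤ Q.length := by
  have h : List.Subperm p Q := List.subperm_of_subset hnd hsub
  exact h.length_le

-- under Pre_DFS no chain of active ancestors rooted at `current` returns to its own node
theorem pvNoCycle {current target : String} {server : List (String × List String)} {memo0 : List (String × Int)}
    (hac : pvActive target server memo0 current = true)
    (hpre : Pre_DFS current target server memo0) {p : List String} {n : String}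
    (h : pvChainF target server memo0 current p n) (hnd : p.Nodup) (hmem : n ∈ p) : False := by
  have hactn : pvActive target server memo0 n = true := pvChainF_active h n hmem
  have hsat : n ∈ pvSatA target server memo0 p.length (pvChildrenA target server memo0 n) :=
    pvChainF_sat h hactn n hmem
  have hsub : ∀ a ∈ p, a ∈ server.map Prod.fst := by
    intro a ha
    obtain ⟨cs, hcs⟩ := pvChainF_keys h a ha
    exact List.mem_map.mpr ⟨(a, cs), pv_get?_mk_some_mem server a cs hcs, rfl⟩
  have hlen : p.length ≤ server.length := by
    have := pv_nodup_len p (server.map Prod.fst) hnd hsub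
    simpa using this
  have hsat2 := pvSatA_le target server memo0 hlen _ hsat
  have hreach : n ∈ pvSatA target server memo0 server.length [current] :=
    pvSatA_le target server memo0 hlen _ (pvChainF_mem_reach h n hmem)
  have hreach' : n ∈ pvSatA target server memo0 server.length
      (if pvActive target server memo0 current = true then [current] else []) := by
    rw [if_pos hac]; exact hreach
  exact hpre n hreach' hsat2

-- memo extension: every binding of m is still a binding of mx
def pvExt (m mx : PySem.Dict String Int) : Prop :=
  ∀ k v, m.get? k = some v → mx.get? k = some v

-- m only ever extends the initial memo: a key absent from m is absent from memo0
def pvM0 (memo0 : List (String × Int)) (m : PySem.Dict String Int) : Prop :=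
  ∀ k, m.get? k = none → (PySem.Dict.mk memo0).get? k = none

theorem pvExt_refl (m : PySem.Dict String Int) : pvExt m m := fun _ _ h => h

theorem pvExt_append (m : PySem.Dict String Int) (new : List (String × Int)) :
    pvExt m (PySem.Dict.mk (m.items ++ new)) := by
  intro k v h
  rw [pv_get?_mk_append]
  rw [show PySem.Dict.mk m.items = m from rfl, h]
  rfl

theorem pvM0_append (memo0 : List (String × Int)) (m : PySem.Dict String Int) (new : List (String × Int))
    (h : pvM0 memo0 m) : pvM0 memo0 (PySem.Dict.mk (m.items ++ new)) := by
  intro k hk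
  rw [pv_get?_mk_append, show PySem.Dict.mk m.items = m from rfl] at hk
  exact h k (Option.or_eq_none_iff.mp hk).1

theorem pv_insert_append (m : PySem.Dict String Int) (k : String) (v : Int)
    (h : m.get? k = none) : (m.insert k v).items = m.items ++ [(k, v)] := by
  apply PySem.Dict.items_insert_of_not_contains
  rw [← PySem.Dict.get?_eq_none_iff_contains] at *
  exact h

-- ===== the two big lemmas: the worklist machine simulates the memoized recursion =====

-- the inner for-loop of A, as processed child by child against the machine
theorem pvMasterList (current target : String) (server : List (String × List String)) (memo0 : List (String × Int))
    (hac : pvActive target server memo0 current = true)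
    (hpre : Pre_DFS current target server memo0) (f : Nat)
    (IH : ∀ (p : List String) (n : String) (m : PySem.Dict String Int) (cs : List String),
      pvChainF target server memo0 current p n → p.Nodup → server.length + 1 ≤ f + p.length →
      ¬ n = target → (PySem.Dict.mk server).get? n = some cs → m.get? n = none →
      pvM0 memo0 m →
      ∃ (total : Int) (new : List (String × Int)) (d : Nat),
        DFS_goA target server f n m = some (total, PySem.Dict.mk (m.items ++ new)) ∧
        (∀ k ∈ new.map Prod.fst,
            m.get? k = none ∧ (∃ cs', (PySem.Dict.mk server).get? k = some cs') ∧
            ∃ P, pvChainF target server memo0 current P k ∧ P.Nodup ∧ ∀ a ∈ p, a ∈ P) ∧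
        (new.map Prod.fst).Nodup ∧
        (PySem.Dict.mk (m.items ++ new)).get? n = some total ∧
        1 ≤ new.length ∧ d + 1 ≤ 2 * new.length ∧
        ∀ (g : Nat) (rest : List String),
          DFS_run target server (d + g) (n :: rest) m = DFS_run target server g rest (PySem.Dict.mk (m.items ++ new))) :
    ∀ (cs' : List String) (p : List String) (n : String) (pre : List String) (t : Int)
      (m1 : PySem.Dict String Int),
      pvChainF target server memo0 current p n → p.Nodup → server.length + 1 ≤ (f + 1) + p.length →
      ¬ n = target → (PySem.Dict.mk server).get? n = some (pre ++ cs') →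
      (PySem.Dict.mk memo0).get? n = none →
      pvM0 memo0 m1 →
      (∀ (mx : PySem.Dict String Int) (l : List String) (t' : Int), pvExt m1 mx →
        DFS_scan target server mx (pre ++ l) t' = DFS_scan target server mx l (t' + t)) →
      ∃ (tt : Int) (new : List (String × Int)) (d : Nat),
        cs'.foldl
            (fun acc path =>
              match acc with
              | none => none
              | some (total, m) =>
                match DFS_goA target server f path m with
                | none => none
                | some (v, m') => some (total + v, m'))
            (some (t, m1)) = some (tt, PySem.Dict.mk (m1.items ++ new)) ∧
        (∀ k ∈ new.map Prod.fst,
            m1.get? k = none ∧ (∃ cs', (PySem.Dict.mk server).get? k = some cs') ∧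
            ∃ P, pvChainF target server memo0 current P k ∧ P.Nodup ∧ ∀ a ∈ (n :: p), a ∈ P) ∧
        (new.map Prod.fst).Nodup ∧
        d ≤ 2 * new.length ∧
        (∀ (g : Nat) (rest : List String),
          DFS_run target server (d + g) (n :: rest) m1 = DFS_run target server g (n :: rest) (PySem.Dict.mk (m1.items ++ new))) ∧
        (∀ (mx : PySem.Dict String Int) (l : List String) (t' : Int), pvExt (PySem.Dict.mk (m1.items ++ new)) mx →
          DFS_scan target server mx ((pre ++ cs') ++ l) t' = DFS_scan target server mx l (t' + tt)) := by
  intro cs'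
  induction cs' with
  | nil =>
    intro p n pre t m1 hanc hnd harith hnt hsv hmn0 hm01 hscan
    refine ⟨t, [], 0, by simp, by simp, by simp, by simp, ?_, ?_⟩
    · intro g rest; simp
    · intro mx l t' hx
      have := hscan mx l t' (by simpa using hx)
      simpa using this
  | cons c cs ihl =>
    intro p n pre t m1 hanc hnd harith hnt hsv hmn0 hm01 hscan
    have hactn : pvActive target server memo0 n = true := by
      simp only [pvActive, Bool.and_eq_true, Bool.not_eq_true', beq_eq_false_iff_ne,
        Option.isSome_iff_exists, Option.isNone_iff_eq_none]
      exact ⟨⟨by simpa using hnt, ⟨_, hsv⟩⟩, hmn0⟩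
    have hnp : n ∉ p := fun hmem => pvNoCycle hac hpre hanc hnd hmem
    have hnodupnp : (n :: p).Nodup := List.nodup_cons.mpr ⟨hnp, hnd⟩
    have hsubnp : ∀ a ∈ n :: p, a ∈ server.map Prod.fst := by
      intro a ha
      rcases List.mem_cons.mp ha with rfl | ha
      · exact List.mem_map.mpr ⟨(a, pre ++ c :: cs), pv_get?_mk_some_mem server a _ hsv, rfl⟩
      · obtain ⟨cs', hcs'⟩ := pvChainF_keys hanc a ha
        exact List.mem_map.mpr ⟨(a, cs'), pv_get?_mk_some_mem server a cs' hcs', rfl⟩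
    have hlennp : p.length + 1 ≤ server.length := by
      have := pv_nodup_len (n :: p) (server.map Prod.fst) hnodupnp hsubnp
      simp only [List.length_cons, List.length_map] at this
      omega
    obtain ⟨f', rfl⟩ : ∃ f', f = f' + 1 := ⟨f - 1, by omega⟩
    have hcmem : c ∈ pre ++ c :: cs := by simp
    have hsv' : (PySem.Dict.mk server).get? n = some ((pre ++ [c]) ++ cs) := by simpa using hsv
    -- the three ‘resolvable’ child cases share one continuation
    have easy : ∀ (vc : Int),
        DFS_goA target server (f' + 1) c m1 = some (vc, m1) →
        (∀ (mx : PySem.Dict String Int), pvExt m1 mx → DFS_val? target server mx c = some vc) →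
        ∃ (tt : Int) (new : List (String × Int)) (d : Nat),
          (c :: cs).foldl
              (fun acc path =>
                match acc with
                | none => none
                | some (total, m) =>
                  match DFS_goA target server (f' + 1) path m with
                  | none => none
                  | some (v, m') => some (total + v, m'))
              (some (t, m1)) = some (tt, PySem.Dict.mk (m1.items ++ new)) ∧
          (∀ k ∈ new.map Prod.fst,
              m1.get? k = none ∧ (∃ cs', (PySem.Dict.mk server).get? k = some cs') ∧
              ∃ P, pvChainF target server memo0 current P k ∧ P.Nodup ∧ ∀ a ∈ (n :: p), a ∈ P) ∧
          (new.map Prod.fst).Nodup ∧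
          d ≤ 2 * new.length ∧
          (∀ (g : Nat) (rest : List String),
            DFS_run target server (d + g) (n :: rest) m1 = DFS_run target server g (n :: rest) (PySem.Dict.mk (m1.items ++ new))) ∧
          (∀ (mx : PySem.Dict String Int) (l : List String) (t' : Int), pvExt (PySem.Dict.mk (m1.items ++ new)) mx →
            DFS_scan target server mx ((pre ++ c :: cs) ++ l) t' = DFS_scan target server mx l (t' + tt)) := by
      intro vc hgo hval
      have hscan2 : ∀ (mx : PySem.Dict String Int) (l : List String) (t' : Int), pvExt m1 mx →
          DFS_scan target server mx ((pre ++ [c]) ++ l) t' = DFS_scan target server mx l (t' + (t + vc)) := by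
        intro mx l t' hx
        rw [show (pre ++ [c]) ++ l = pre ++ (c :: l) by simp]
        rw [hscan mx (c :: l) t' hx, DFS_scan, hval mx hx]
        simp only [add_assoc]
      obtain ⟨tt, new, d, H1, H2, H3, H4, H5, H6⟩ :=
        ihl p n (pre ++ [c]) (t + vc) m1 hanc hnd harith hnt hsv' hmn0 hm01 hscan2
      refine ⟨tt, new, d, ?_, H2, H3, H4, H5, ?_⟩
      · rw [List.foldl_cons]
        simp only [hgo]
        exact H1
      · intro mx l t' hx
        have := H6 mx l t' hx
        simpa using this
    by_cases hct : c = target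
    · exact easy 1 (by rw [DFS_goA, if_pos hct]) (fun mx _ => by simp [DFS_val?, hct])
    · cases hcs : (PySem.Dict.mk server).get? c with
      | none =>
        have := easy 0 (by rw [DFS_goA, if_neg hct, hcs]) (fun mx _ => by simp [DFS_val?, hct, hcs])
        simpa using this
      | some ccs =>
        cases hcm : m1.get? c with
        | some v =>
          exact easy v (by rw [DFS_goA, if_neg hct, hcs, hcm])
            (fun mx hx => by simp only [DFS_val?, if_neg hct, hcs]; exact hx c v hcm)
        | none =>
          -- unresolved child: A recurses, B pushes it on the stack
          have hanc2 : pvChainF target server memo0 current (n :: p) c :=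
            pvChainF.cons hsv hcmem hactn hanc
          obtain ⟨vc, newc, dc, C1, C2, C3, C4, C5, C6, C7⟩ :=
            IH (n :: p) c m1 ccs hanc2 hnodupnp (by simp only [List.length_cons]; omega)
              hct hcs hcm hm01
          have hext12 : pvExt m1 (PySem.Dict.mk (m1.items ++ newc)) := pvExt_append m1 newc
          have hm01' : pvM0 memo0 (PySem.Dict.mk (m1.items ++ newc)) := pvM0_append memo0 m1 newc hm01
          have hscan2 : ∀ (mx : PySem.Dict String Int) (l : List String) (t' : Int),
              pvExt (PySem.Dict.mk (m1.items ++ newc)) mx →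
              DFS_scan target server mx ((pre ++ [c]) ++ l) t' = DFS_scan target server mx l (t' + (t + vc)) := by
            intro mx l t' hx
            have hxm1 : pvExt m1 mx := fun k v h => hx k v (hext12 k v h)
            rw [show (pre ++ [c]) ++ l = pre ++ (c :: l) by simp]
            rw [hscan mx (c :: l) t' hxm1, DFS_scan]
            have hv : DFS_val? target server mx c = some vc := by
              simp only [DFS_val?, if_neg hct, hcs]
              exact hx c vc C4
            rw [hv]
            simp only [add_assoc]
          obtain ⟨tt, new, d, H1, H2, H3, H4, H5, H6⟩ :=
            ihl p n (pre ++ [c]) (t + vc) (PySem.Dict.mk (m1.items ++ newc)) hanc hnd harith hnt hsv' hmn0 hm01' hscan2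
          have hitems : (PySem.Dict.mk (m1.items ++ newc)).items ++ new = m1.items ++ (newc ++ new) := by
            simp
          refine ⟨tt, newc ++ new, (1 + dc) + d, ?_, ?_, ?_, ?_, ?_, ?_⟩
          · rw [List.foldl_cons]
            simp only [C1]
            rw [H1]
            congr 1
            rw [Prod.mk.injEq]
            exact ⟨rfl, congrArg PySem.Dict.mk hitems⟩
          · intro k hk
            simp only [List.map_append, List.mem_append] at hk
            rcases hk with hk | hk
            · exact C2 k hk
            · obtain ⟨h1, h2, P, hP, hPnd, hsubP⟩ := H2 k hk
              refine ⟨?_, h2, P, hP, hPnd, hsubP⟩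
              rw [pv_get?_mk_append, show PySem.Dict.mk m1.items = m1 from rfl] at h1
              exact (Option.or_eq_none_iff.mp h1).1
          · simp only [List.map_append]
            refine List.Nodup.append C3 H3 ?_
            intro k hk1 hk2
            obtain ⟨h1, -, -⟩ := H2 k hk2
            rw [pv_get?_mk_append] at h1
            have h2 := (Option.or_eq_none_iff.mp h1).2
            exact pv_get?_mk_none_not_mem newc k h2 hk1
          · simp only [List.length_append]
            omega
          · intro g rest
            have harr : (1 + dc) + d + g = (dc + (d + g)) + 1 := by omega
            rw [harr, DFS_run]
            have hscanstep : DFS_scan target server m1 (((PySem.Dict.mk server).get? n).getD []) 0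
                = (some c, 0 + t) := by
              rw [hsv]
              simp only [Option.getD_some]
              rw [hscan m1 (c :: cs) 0 (pvExt_refl m1), DFS_scan]
              have : DFS_val? target server m1 c = none := by
                simp [DFS_val?, hct, hcs, hcm]
              rw [this]
            rw [hscanstep]
            simp only []
            rw [C7 (d + g) (n :: rest), H5 g rest]
            congr 1
            exact congrArg PySem.Dict.mk hitems
          · intro mx l t' hx
            have hx' : pvExt (PySem.Dict.mk ((PySem.Dict.mk (m1.items ++ newc)).items ++ new)) mx := by
              intro k v h
              apply hx
              rw [show (PySem.Dict.mk (m1.items ++ newc)).items ++ new = m1.items ++ (newc ++ new) from hitems] at h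
              exact h
            have := H6 mx l t' hx'
            simpa using this

theorem pvMaster (current target : String) (server : List (String × List String)) (memo0 : List (String × Int))
    (hac : pvActive target server memo0 current = true)
    (hpre : Pre_DFS current target server memo0) :
    ∀ (f : Nat) (p : List String) (n : String) (m : PySem.Dict String Int) (cs : List String),
      pvChainF target server memo0 current p n → p.Nodup → server.length + 1 ≤ f + p.length →
      ¬ n = target → (PySem.Dict.mk server).get? n = some cs → m.get? n = none →
      pvM0 memo0 m →
      ∃ (total : Int) (new : List (String × Int)) (d : Nat),
        DFS_goA target server f n m = some (total, PySem.Dict.mk (m.items ++ new)) ∧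
        (∀ k ∈ new.map Prod.fst,
            m.get? k = none ∧ (∃ cs', (PySem.Dict.mk server).get? k = some cs') ∧
            ∃ P, pvChainF target server memo0 current P k ∧ P.Nodup ∧ ∀ a ∈ p, a ∈ P) ∧
        (new.map Prod.fst).Nodup ∧
        (PySem.Dict.mk (m.items ++ new)).get? n = some total ∧
        1 ≤ new.length ∧ d + 1 ≤ 2 * new.length ∧
        ∀ (g : Nat) (rest : List String),
          DFS_run target server (d + g) (n :: rest) m = DFS_run target server g rest (PySem.Dict.mk (m.items ++ new)) := by
  intro f
  induction f with
  | zero =>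
    intro p n m cs hanc hnd harith hnt hsv hm hm0
    exfalso
    have hsub : ∀ a ∈ p, a ∈ server.map Prod.fst := by
      intro a ha
      obtain ⟨cs', hcs'⟩ := pvChainF_keys hanc a ha
      exact List.mem_map.mpr ⟨(a, cs'), pv_get?_mk_some_mem server a cs' hcs', rfl⟩
    have := pv_nodup_len p (server.map Prod.fst) hnd hsub
    simp only [List.length_map] at this
    omega
  | succ f ih =>
    intro p n m cs hanc hnd harith hnt hsv hm hm0
    have hmn0 : (PySem.Dict.mk memo0).get? n = none := hm0 n hm
    obtain ⟨tt, new, d, hfold, hfresh, hnodup, hd, hrun, hscanfull⟩ :=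
      pvMasterList current target server memo0 hac hpre f ih cs p n [] 0 m hanc hnd harith hnt
        (by simpa using hsv) hmn0 hm0
        (by intro mx l t' _; simp)
    -- n was not inserted during the loop (a cycle would contradict Pre_DFS)
    have hnfresh : (PySem.Dict.mk (m.items ++ new)).get? n = none := by
      rw [pv_get?_mk_append, show PySem.Dict.mk m.items = m from rfl, hm, Option.none_or]
      cases hn : (PySem.Dict.mk new).get? n with
      | none => rfl
      | some v =>
        exfalso
        have hmem : n ∈ new.map Prod.fst :=
          List.mem_map.mpr ⟨(n, v), pv_get?_mk_some_mem new n v hn, rfl⟩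
        obtain ⟨-, -, P, hP, hPnd, hsubP⟩ := hfresh n hmem
        exact pvNoCycle hac hpre hP hPnd (hsubP n (List.mem_cons_self))
    have hins : ((PySem.Dict.mk (m.items ++ new)).insert n tt).items
        = m.items ++ (new ++ [(n, tt)]) := by
      rw [pv_insert_append _ _ _ hnfresh]
      simp
    have hm2 : (PySem.Dict.mk (m.items ++ new)).insert n tt
        = PySem.Dict.mk (m.items ++ (new ++ [(n, tt)])) := by
      apply PySem.Dict.ext
      simpa using hins
    refine ⟨tt, new ++ [(n, tt)], d + 1, ?_, ?_, ?_, ?_, ?_, ?_, ?_⟩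
    · -- the port returns (tt, memo extended by the loop's entries then (n, tt))
      rw [DFS_goA, if_neg hnt, hsv, hm]
      simp only []
      rw [hfold]
      simp only [PySem.Dict.get?_insert_self]
      rw [hm2]
    · intro k hk
      simp only [List.map_append, List.map_cons, List.map_nil, List.mem_append,
        List.mem_cons, List.not_mem_nil, or_false] at hk
      rcases hk with hk | rfl
      · obtain ⟨h1, h2, P, hP, hPnd, hsubP⟩ := hfresh k hk
        exact ⟨h1, h2, P, hP, hPnd, fun a ha => hsubP a (List.mem_cons_of_mem _ ha)⟩
      · exact ⟨hm, ⟨cs, hsv⟩, p, hanc, hnd, fun a ha => ha⟩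
    · have hnmem : n ∉ new.map Prod.fst := by
        intro hmem
        obtain ⟨-, -, P, hP, hPnd, hsubP⟩ := hfresh n hmem
        exact pvNoCycle hac hpre hP hPnd (hsubP n (List.mem_cons_self))
      simp only [List.map_append, List.map_cons, List.map_nil]
      exact List.Nodup.append hnodup (List.nodup_singleton _)
        (by simpa [List.disjoint_singleton] using hnmem)
    · rw [← hm2, PySem.Dict.get?_insert_self]
    · simp
    · simp only [List.length_append, List.length_cons, List.length_nil]
      omega
    · intro g rest
      have h1 : d + 1 + g = d + (1 + g) := by omega
      rw [h1, hrun (1 + g) rest]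
      have hscan : DFS_scan target server (PySem.Dict.mk (m.items ++ new))
          (((PySem.Dict.mk server).get? n).getD []) 0 = (none, tt) := by
        have := hscanfull (PySem.Dict.mk (m.items ++ new)) [] 0 (pvExt_refl _)
        simpa [hsv] using this
      rw [show 1 + g = g + 1 from by omega, DFS_run, hscan]
      simp only []
      rw [hm2]

-- ===== VERDICT (by name: the statement is the Claim_ definition above) =====
theorem DFS_spec : Claim_equal_DFS := by
  intro current target server memo _hdom hpre
  unfold Spec_DFS DFS DFS_alt
  by_cases ht : current = target
  · rw [DFS_goA, if_pos ht]
    simp [DFS_val?, ht]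
  · cases hs : (PySem.Dict.mk server).get? current with
    | none =>
      rw [DFS_goA, if_neg ht, hs]
      simp [DFS_val?, ht, hs]
    | some cs =>
      cases hm : (PySem.Dict.mk memo).get? current with
      | some v =>
        rw [DFS_goA, if_neg ht, hs, hm]
        simp [DFS_val?, ht, hs, hm]
      | none =>
        have hac : pvActive target server memo current = true := by
          simp only [pvActive, Bool.and_eq_true, Bool.not_eq_true', beq_eq_false_iff_ne,
            Option.isSome_iff_exists, Option.isNone_iff_eq_none]
          exact ⟨⟨ht, ⟨cs, hs⟩⟩, hm⟩
        obtain ⟨total, new, d, heq, hfresh, hnodup, hget, h1len, hdb, hrun⟩ :=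
          pvMaster current target server memo hac hpre (server.length + 1) [] current
            (PySem.Dict.mk memo) cs (pvChainF.nil) List.nodup_nil
            (by omega) ht hs hm (fun k h => h)
        rw [heq]
        have hval : DFS_val? target server (PySem.Dict.mk memo) current = none := by
          simp [DFS_val?, ht, hs, hm]
        rw [hval]
        -- the machine has enough fuel: at most server.length nodes get memoized
        have hlen : new.length ≤ server.length := by
          have hsub : ∀ k ∈ new.map Prod.fst, k ∈ server.map Prod.fst := by
            intro k hk
            obtain ⟨-, ⟨cs', hcs'⟩, -⟩ := hfresh k hk
            exact List.mem_map.mpr ⟨(k, cs'), pv_get?_mk_some_mem server k cs' hcs', rfl⟩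
          have := pv_nodup_len (new.map Prod.fst) (server.map Prod.fst) hnodup hsub
          simpa using this
        have hg : 2 * server.length + 2 = d + (2 * server.length + 2 - d) := by omega
        rw [hg, hrun]
        have hg2 : 2 * server.length + 2 - d = (2 * server.length + 1 - d) + 1 := by omega
        rw [hg2, DFS_run]
        simp only []
        rw [PySem.Dict.getD_of_get?_eq_some _ _ hget]
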